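-- pv_equiv track=rewrite | github.com/csyager/wordle-bot | bot.py | most_frequent_chars_to_string
-- ===== SOURCE A (Python) =====
-- def most_frequent_chars_to_string(most_frequent_dict: dict, word_list: list):
-- 	top_five_chars = sorted(most_frequent_dict, key=most_frequent_dict.get, reverse=True)[:5]
-- 	scores = {}
-- 	for word in word_list:
-- 		score = 0
-- 		for c in top_five_chars:
-- 			if c in word:
-- 				score += 1
-- 		scores[word] = score
-- 	return max(scores, key=scores.get)
-- ===== SOURCE B (Python) =====
-- def most_frequent_chars_to_string(most_frequent_dict: dict, word_list: list):
-- 	top_five_chars = sorted(most_frequent_dict, key=most_frequent_dict.get, reverse=True)[:5]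
-- 	# char-major counting: one counts slot per word position, bumped once per top char
-- 	counts = [0] * len(word_list)
-- 	for c in top_five_chars:
-- 		counts = [n + (c in w) for n, w in zip(counts, word_list)]
-- 	# first index with the maximal count (strict '>' keeps the earliest winner)
-- 	best = 0
-- 	for i in range(1, len(word_list)):
-- 		if counts[i] > counts[best]:
-- 			best = i
-- 	return word_list[best]
-- ===== Notes on version B (the rewrite author's own statement) =====
-- stated objective: alternative
-- what changed: B inverts A's loop nest and drops the scores dict: instead of scoring each word over the top-5 chars and then taking max over a dict, B makes one char-major pass per top char bumping an index-aligned counts list, then picks the winner with an explicit first-wins index-argmax scan and returns word_list[best].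
import Mathlib
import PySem

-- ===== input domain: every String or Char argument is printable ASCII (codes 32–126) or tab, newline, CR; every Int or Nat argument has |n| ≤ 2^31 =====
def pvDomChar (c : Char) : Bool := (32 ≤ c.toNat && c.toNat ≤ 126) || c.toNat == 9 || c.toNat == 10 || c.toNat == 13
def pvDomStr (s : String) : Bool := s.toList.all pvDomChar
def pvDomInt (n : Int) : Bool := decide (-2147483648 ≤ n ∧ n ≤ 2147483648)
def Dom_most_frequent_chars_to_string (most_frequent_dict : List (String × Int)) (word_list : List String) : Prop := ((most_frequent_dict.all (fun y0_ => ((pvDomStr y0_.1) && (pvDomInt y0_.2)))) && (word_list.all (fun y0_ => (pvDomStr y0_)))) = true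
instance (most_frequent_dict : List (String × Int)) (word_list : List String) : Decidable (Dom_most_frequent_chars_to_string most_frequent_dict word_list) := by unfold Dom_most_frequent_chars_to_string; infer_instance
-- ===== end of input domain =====

-- B replaces A's word-major scores dict (score each word over the top-5 chars, then max over the
-- dict) by a char-major pass bumping an index-aligned counts list, followed by an explicit
-- first-wins index argmax; objective: alternative decomposition (same asymptotic cost).

-- ===== PORT A =====
def most_frequent_chars_to_string (most_frequent_dict : List (String × Int)) (word_list : List String) : String :=
  let d := PySem.Dict.ofList most_frequent_dict
  -- sorted(most_frequent_dict, key=most_frequent_dict.get, reverse=True)[:5];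
  -- on the dict's own keys .get never returns None, so getD _ 0 is exact
  let top_five_chars := PySem.List.slice
    (PySem.List.sorted (PySem.Dict.keys d) (fun k => PySem.Dict.getD d k 0) true) none (some 5)
  let scores := word_list.foldl (fun scores word =>
      scores.insert word
        (top_five_chars.foldl (fun score c => if PySem.Str.isIn c word then score + 1 else score) (0 : Int)))
    PySem.Dict.empty
  -- max(scores, key=scores.get); Pre_ excludes word_list = [], where Python raises ValueError
  PySem.List.maxD (PySem.Dict.keys scores) (fun w => PySem.Dict.getD scores w 0) ""

-- ===== PORT B =====
def most_frequent_chars_to_string_alt (most_frequent_dict : List (String × Int)) (word_list : List String) : String :=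
  let d := PySem.Dict.ofList most_frequent_dict
  let top_five_chars := PySem.List.slice
    (PySem.List.sorted (PySem.Dict.keys d) (fun k => PySem.Dict.getD d k 0) true) none (some 5)
  -- counts = [0]*len(word_list); for c: counts = [n + (c in w) for n, w in zip(counts, word_list)]
  let counts := top_five_chars.foldl
    (fun counts c => (counts.zip word_list).map
      (fun p => p.1 + (if PySem.Str.isIn c p.2 then (1 : Int) else 0)))
    (List.replicate word_list.length (0 : Int))
  -- best = 0; for i in range(1, len(word_list)): if counts[i] > counts[best]: best = i
  let best : Int := (PySem.List.pyRange 1 (word_list.length : Int) 1).foldl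
    (fun best i => if PySem.List.pyGetD counts i 0 > PySem.List.pyGetD counts best 0 then i else best)
    0
  -- word_list[best]: Python raises IndexError only when word_list = [] (outside Pre_)
  (PySem.List.pyGet? word_list best).getD ""

-- ===== PRECONDITION & SPEC =====
-- Pre_ excludes exactly word_list = [], where Python raises (ValueError in A, IndexError in B).
def Pre_most_frequent_chars_to_string (most_frequent_dict : List (String × Int)) (word_list : List String) : Prop := word_list ≠ []
instance (most_frequent_dict : List (String × Int)) (word_list : List String) : Decidable (Pre_most_frequent_chars_to_string most_frequent_dict word_list) := by unfold Pre_most_frequent_chars_to_string; infer_instance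
def pvWitness_most_frequent_chars_to_string : (List (String × Int)) × List String := ([("e", 5), ("a", 3)], ["tea", "dog"])
def Spec_most_frequent_chars_to_string (most_frequent_dict : List (String × Int)) (word_list : List String) (out : String) : Prop := out = most_frequent_chars_to_string_alt most_frequent_dict word_list
instance (most_frequent_dict : List (String × Int)) (word_list : List String) (out : String) : Decidable (Spec_most_frequent_chars_to_string most_frequent_dict word_list out) := by unfold Spec_most_frequent_chars_to_string; infer_instance

-- ===== CLAIM (what is proved, stated in full; the proofs are below) =====
def Claim_equal_most_frequent_chars_to_string : Prop := ∀ (most_frequent_dict : List (String × Int)) (word_list : List String), Dom_most_frequent_chars_to_string most_frequent_dict word_list → Pre_most_frequent_chars_to_string most_frequent_dict word_list → Spec_most_frequent_chars_to_string most_frequent_dict word_list (most_frequent_chars_to_string most_frequent_dict word_list)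

-- ===== LEMMAS AND PROOFS =====

-- the fold step of Python's max(xs, key=key) (first-wins)
def pvStep {α : Type} (key : α → Int) (acc : Option α) (x : α) : Option α :=
  match acc with
  | none => some x
  | some m => if key m < key x then some x else some m

theorem pv_max?_eq_foldl {α : Type} (xs : List α) (key : α → Int) :
    PySem.List.max? xs key = xs.foldl (pvStep key) none := rfl

theorem pvStep_some {α : Type} (key : α → Int) (m x : α) :
    pvStep key (some m) x = if key m < key x then some x else some m := rfl

-- elements whose key is dominated by the accumulator never move Python's running max
theorem pv_foldl_step_skip {α : Type} [BEq α] [LawfulBEq α] (key : α → Int) (x : α) :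
    ∀ (xs : List α) (a : α), key x ≤ key a →
      (xs.filter (fun y => !(y == x))).foldl (pvStep key) (some a)
        = xs.foldl (pvStep key) (some a) := by
  intro xs
  induction xs with
  | nil => intro a _; rfl
  | cons h t ih =>
    intro a hle
    by_cases hb : (h == x) = true
    · have hx : h = x := eq_of_beq hb
      subst hx
      have hf : (h :: t).filter (fun y => !(y == h)) = t.filter (fun y => !(y == h)) := by
        simp
      have e : pvStep key (some a) h = some a := by
        rw [pvStep_some, if_neg (not_lt.mpr hle)]
      rw [hf, List.foldl_cons, e]
      exact ih a hle
    · have hf : (h :: t).filter (fun y => !(y == x)) = h :: t.filter (fun y => !(y == x)) := by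
        simp [hb]
      rw [hf, List.foldl_cons, List.foldl_cons, pvStep_some]
      split_ifs with hlt
      · exact ih h (le_of_lt (lt_of_le_of_lt hle hlt))
      · exact ih a hle

-- Set.add of a present element is a no-op along a fold
theorem pv_foldl_add_skip {α : Type} [BEq α] [LawfulBEq α] (x : α) :
    ∀ (t : List α) (s : PySem.Set α), x ∈ s →
      (t.filter (fun y => !(y == x))).foldl PySem.Set.add s = t.foldl PySem.Set.add s := by
  intro t
  induction t with
  | nil => intro s _; rfl
  | cons y t' ih =>
    intro s hs
    by_cases hb : (y == x) = true
    · have hx : y = x := eq_of_beq hb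
      subst hx
      have hadd : PySem.Set.add s y = s := by
        unfold PySem.Set.add
        rw [if_pos ((PySem.Set.contains_iff s y).mpr hs)]
      have hf : (y :: t').filter (fun z => !(z == y)) = t'.filter (fun z => !(z == y)) := by
        simp
      rw [hf, List.foldl_cons, hadd]
      exact ih s hs
    · have hf : (y :: t').filter (fun z => !(z == x)) = y :: t'.filter (fun z => !(z == x)) := by
        simp [hb]
      rw [hf, List.foldl_cons, List.foldl_cons]
      exact ih _ ((PySem.Set.mem_add s y x).mpr (Or.inl hs))

theorem pv_foldl_add_prefix {α : Type} [BEq α] [LawfulBEq α] :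
    ∀ (ys : List α) (sa sb : List α), (∀ y ∈ ys, y ∉ sa) →
      ys.foldl PySem.Set.add (sa ++ sb) = sa ++ ys.foldl PySem.Set.add sb := by
  intro ys
  induction ys with
  | nil => intro sa sb _; rfl
  | cons y t ih =>
    intro sa sb hsa
    have h1 : PySem.Set.add (sa ++ sb) y = sa ++ PySem.Set.add sb y := by
      unfold PySem.Set.add
      by_cases hb : y ∈ sb
      · rw [if_pos ((PySem.Set.contains_iff _ _).mpr (by simp [hb])),
            if_pos ((PySem.Set.contains_iff _ _).mpr hb)]
      · rw [if_neg (fun hc => by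
              rcases List.mem_append.mp ((PySem.Set.contains_iff _ _).mp hc) with h | h
              · exact hsa y (by simp) h
              · exact hb h),
            if_neg (fun hc => hb ((PySem.Set.contains_iff _ _).mp hc)), List.append_assoc]
    simp only [List.foldl_cons, h1]
    exact ih sa (PySem.Set.add sb y) (fun z hz => hsa z (by simp [hz]))

theorem pv_dedup_cons {α : Type} [BEq α] [LawfulBEq α] (h : α) (t : List α) :
    PySem.List.dedup (h :: t) = h :: PySem.List.dedup (t.filter (fun y => !(y == h))) := by
  have h0 : PySem.List.dedup (h :: t) = t.foldl PySem.Set.add [h] := by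
    simp [PySem.List.dedup, PySem.Set.ofList_eq_foldl, PySem.Set.add, PySem.Set.contains]
  rw [h0, ← pv_foldl_add_skip h t [h] (by simp)]
  have h2 : (t.filter (fun y => !(y == h))).foldl PySem.Set.add ([h] ++ [])
      = [h] ++ (t.filter (fun y => !(y == h))).foldl PySem.Set.add [] := by
    apply pv_foldl_add_prefix
    intro y hy
    have hne : (y == h) = false := by simpa using List.of_mem_filter hy
    simp [beq_eq_false_iff_ne.mp hne]
  simpa [PySem.List.dedup, PySem.Set.ofList_eq_foldl] using h2

theorem pv_foldl_step_dedup {α : Type} [BEq α] [LawfulBEq α] (key : α → Int) :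
    ∀ (n : Nat) (t : List α), t.length ≤ n → ∀ a : α,
      (PySem.List.dedup t).foldl (pvStep key) (some a) = t.foldl (pvStep key) (some a) := by
  intro n
  induction n with
  | zero =>
    intro t ht a
    have : t = [] := List.eq_nil_of_length_eq_zero (Nat.le_zero.mp ht)
    subst this; rfl
  | succ n ih =>
    intro t ht a
    cases t with
    | nil => rfl
    | cons h t' =>
      rw [pv_dedup_cons]
      simp only [List.foldl_cons]
      have hlen : (t'.filter (fun y => !(y == h))).length ≤ n :=
        le_trans (List.length_filter_le _ _) (Nat.lt_succ_iff.mp (Nat.lt_of_lt_of_le (Nat.lt_succ_of_le (le_refl _)) ht))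
      rw [pvStep_some]
      split_ifs with hlt
      · rw [ih _ hlen h, pv_foldl_step_skip key h t' h (le_refl _)]
      · rw [ih _ hlen a, pv_foldl_step_skip key h t' a (not_lt.mp hlt)]

theorem pv_max?_dedup {α : Type} [BEq α] [LawfulBEq α] (xs : List α) (key : α → Int) :
    PySem.List.max? (PySem.List.dedup xs) key = PySem.List.max? xs key := by
  cases xs with
  | nil => rfl
  | cons h t =>
    rw [pv_max?_eq_foldl, pv_max?_eq_foldl, pv_dedup_cons]
    simp only [List.foldl_cons]
    rw [show pvStep key none h = some h from rfl,
        pv_foldl_step_dedup key (t.filter (fun y => !(y == h))).length _ (le_refl _) h]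
    exact pv_foldl_step_skip key h t h (le_refl _)

theorem pv_maxD_dedup {α : Type} [BEq α] [LawfulBEq α] (xs : List α) (key : α → Int) (d : α) :
    PySem.List.maxD (PySem.List.dedup xs) key d = PySem.List.maxD xs key d := by
  unfold PySem.List.maxD
  rw [pv_max?_dedup]

theorem pv_foldl_step_congr {α : Type} (f g : α → Int) :
    ∀ (xs : List α), (∀ x ∈ xs, f x = g x) → ∀ a : α, f a = g a →
      xs.foldl (pvStep f) (some a) = xs.foldl (pvStep g) (some a) := by
  intro xs
  induction xs with
  | nil => intro _ a _; rfl
  | cons h t ih =>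
    intro hx a ha
    simp only [List.foldl_cons, pvStep_some, ha, hx h (by simp)]
    split_ifs with hlt
    · exact ih (fun x hxm => hx x (by simp [hxm])) h (hx h (by simp))
    · exact ih (fun x hxm => hx x (by simp [hxm])) a ha

theorem pv_maxD_congr {α : Type} (xs : List α) (f g : α → Int) (d : α)
    (h : ∀ x ∈ xs, f x = g x) : PySem.List.maxD xs f d = PySem.List.maxD xs g d := by
  cases xs with
  | nil => rfl
  | cons x t =>
    simp only [PySem.List.maxD, pv_max?_eq_foldl, List.foldl_cons]
    rw [show pvStep f none x = some x from rfl, show pvStep g none x = some x from rfl,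
        pv_foldl_step_congr f g t (fun y hy => h y (by simp [hy])) x (h x (by simp))]

-- dict lemmas for A's scores = word_list.foldl (insert word (g word)) empty
theorem pv_get?_foldl_notmem (g : String → Int) :
    ∀ (wl : List String) (d0 : PySem.Dict String Int) (w : String), w ∉ wl →
      (wl.foldl (fun d u => d.insert u (g u)) d0).get? w = d0.get? w := by
  intro wl
  induction wl with
  | nil => intro d0 w _; rfl
  | cons h t ih =>
    intro d0 w hw
    simp only [List.foldl_cons]
    rw [ih _ w (fun hm => hw (by simp [hm])),
        PySem.Dict.get?_insert_of_ne _ _ (fun he => hw (by simp [he]))]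

theorem pv_get?_foldl_mem (g : String → Int) :
    ∀ (wl : List String) (d0 : PySem.Dict String Int) (w : String), w ∈ wl →
      (wl.foldl (fun d u => d.insert u (g u)) d0).get? w = some (g w) := by
  intro wl
  induction wl with
  | nil => intro _ _ h; exact absurd h (by simp)
  | cons h t ih =>
    intro d0 w hw
    simp only [List.foldl_cons]
    by_cases hm : w ∈ t
    · exact ih _ w hm
    · have hwh : w = h := by
        rcases List.mem_cons.mp hw with h1 | h1
        · exact h1
        · exact absurd h1 hm
      subst hwh
      rw [pv_get?_foldl_notmem g t _ w hm, PySem.Dict.get?_insert_self]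

theorem pv_contains_keys (d : PySem.Dict String Int) (k : String) :
    PySem.Set.contains (PySem.Dict.keys d) k = d.contains k := by
  obtain ⟨items⟩ := d
  induction items with
  | nil => rfl
  | cons p t ih =>
    simp only [PySem.Dict.keys, PySem.Dict.contains, PySem.Set.contains, List.map_cons,
      List.any_cons, List.contains_cons] at ih ⊢
    rw [ih]
    by_cases hkp : k = p.1
    · simp [hkp]
    · simp [beq_false_of_ne hkp, beq_false_of_ne (Ne.symm hkp)]

theorem pv_keys_insert (d : PySem.Dict String Int) (k : String) (v : Int) :
    (d.insert k v).keys = PySem.Set.add (PySem.Dict.keys d) k := by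
  unfold PySem.Dict.insert PySem.Set.add
  rw [pv_contains_keys]
  by_cases hc : d.contains k = true
  · rw [if_pos hc, if_pos hc]
    simp only [PySem.Dict.keys, List.map_map]
    congr 1
    funext p
    by_cases hb : (p.1 == k) = true
    · simp [Function.comp, eq_of_beq hb]
    · simp [Function.comp, hb]
  · rw [if_neg hc, if_neg hc]
    simp [PySem.Dict.keys]

theorem pv_keys_foldl (g : String → Int) :
    ∀ (wl : List String) (d0 : PySem.Dict String Int),
      (wl.foldl (fun d u => d.insert u (g u)) d0).keys
        = wl.foldl PySem.Set.add (PySem.Dict.keys d0) := by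
  intro wl
  induction wl with
  | nil => intro d0; rfl
  | cons h t ih =>
    intro d0
    simp only [List.foldl_cons]
    rw [ih, pv_keys_insert]

-- A's scores-dict argmax equals the direct first-wins argmax of wl under the same score
theorem pv_A_maxD (wl : List String) (g : String → Int) :
    PySem.List.maxD
      (PySem.Dict.keys (wl.foldl (fun d u => d.insert u (g u)) PySem.Dict.empty))
      (fun w => PySem.Dict.getD (wl.foldl (fun d u => d.insert u (g u)) PySem.Dict.empty) w 0) ""
    = PySem.List.maxD wl g "" := by
  have hkeys : (wl.foldl (fun d u => d.insert u (g u)) PySem.Dict.empty).keys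
      = PySem.List.dedup wl := by
    rw [pv_keys_foldl]
    simp [PySem.List.dedup, PySem.Set.ofList_eq_foldl, PySem.Dict.keys, PySem.Dict.empty]
  rw [hkeys]
  have hval : ∀ w ∈ PySem.List.dedup wl,
      PySem.Dict.getD (wl.foldl (fun d u => d.insert u (g u)) PySem.Dict.empty) w 0 = g w := by
    intro w hw
    have hmem : w ∈ wl := by
      have := hw
      rw [show PySem.List.dedup wl = PySem.Set.ofList wl from rfl] at this
      exact (PySem.Set.mem_ofList wl w).mp this
    simp [PySem.Dict.getD, pv_get?_foldl_mem g wl PySem.Dict.empty w hmem]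
  rw [pv_maxD_congr _ _ g _ hval, pv_maxD_dedup]

-- B side: one char-major pass over counts = wl.map h turns it into wl.map (h + indicator)
theorem pv_zip_map_step (c : String) (wl : List String) (h : String → Int) :
    (((wl.map h).zip wl).map (fun p => p.1 + (if PySem.Str.isIn c p.2 then (1 : Int) else 0)))
      = wl.map (fun w => h w + (if PySem.Str.isIn c w then (1 : Int) else 0)) := by
  induction wl with
  | nil => rfl
  | cons w t ih => simp only [List.map_cons, List.zip_cons_cons, ih]

-- the whole char-major fold computes A's per-word score at every position
theorem pv_counts_eq (wl : List String) :
    ∀ (cs : List String) (h : String → Int),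
      cs.foldl (fun counts c => (counts.zip wl).map
          (fun p => p.1 + (if PySem.Str.isIn c p.2 then (1 : Int) else 0))) (wl.map h)
        = wl.map (fun w => cs.foldl
            (fun score c => if PySem.Str.isIn c w then score + 1 else score) (h w)) := by
  intro cs
  induction cs with
  | nil => intro h; rfl
  | cons c cs' ih =>
    intro h
    simp only [List.foldl_cons, pv_zip_map_step]
    rw [ih (fun w => h w + (if PySem.Str.isIn c w then (1 : Int) else 0))]
    apply List.map_congr_left
    intro w _
    congr 1
    split <;> simp

-- the index-argmax fold: invariant over the processed prefix
theorem pv_idx_fold (key : String → Int) :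
    ∀ (t pref : List String) (b : Nat), b < pref.length →
      (List.range' pref.length t.length).foldl
          (fun b i => if ((pref ++ t).map key).getD b 0 < ((pref ++ t).map key).getD i 0 then i else b) b
          < (pref ++ t).length
      ∧ (pref ++ t).getD
          ((List.range' pref.length t.length).foldl
            (fun b i => if ((pref ++ t).map key).getD b 0 < ((pref ++ t).map key).getD i 0 then i else b) b) ""
        = (t.foldl (pvStep key) (some (pref.getD b ""))).getD "" := by
  intro t
  induction t with
  | nil =>
    intro pref b hb
    constructor
    · simpa using Nat.lt_of_lt_of_le hb (by simp)
    · simp [List.getD_append _ _ _ _ hb]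
  | cons h t' ih =>
    intro pref b hb
    have hfull : pref ++ h :: t' = (pref ++ [h]) ++ t' := by simp
    have hmid : ((pref ++ h :: t').map key).getD pref.length 0 = key h := by
      have : pref.length < (pref ++ h :: t').length := by simp
      rw [List.getD_eq_getElem _ _ (by simpa using this)]
      simp
    have hleft : ((pref ++ h :: t').map key).getD b 0 = key (pref.getD b "") := by
      rw [List.getD_eq_getElem _ _ (by simp; omega), List.getD_eq_getElem _ _ hb,
        List.getElem_map]
      congr 1
      exact List.getElem_append_left hb
    have hrange : List.range' pref.length (h :: t').length
        = pref.length :: List.range' (pref.length + 1) t'.length := by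
      simp [List.range'_succ]
    rw [hrange]
    simp only [List.foldl_cons, hmid, hleft]
    have hpl : (pref ++ [h]).length = pref.length + 1 := by simp
    by_cases hlt : key (pref.getD b "") < key h
    · rw [if_pos hlt]
      have := ih (pref ++ [h]) pref.length (by simp)
      rw [hpl] at this
      rw [hfull]
      have hgd : (pref ++ [h]).getD pref.length "" = h := by
        rw [List.getD_eq_getElem _ _ (by simp)]
        simp
      rw [hgd] at this
      rw [show t'.foldl (pvStep key) (pvStep key (some (pref.getD b "")) h)
            = t'.foldl (pvStep key) (some h) by rw [pvStep_some, if_pos hlt]]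
      exact this
    · rw [if_neg hlt]
      have := ih (pref ++ [h]) b (by simp; omega)
      rw [hpl] at this
      rw [hfull]
      have hgd : (pref ++ [h]).getD b "" = pref.getD b "" := by
        rw [List.getD_append _ _ _ _ hb]
      rw [hgd] at this
      rw [show t'.foldl (pvStep key) (pvStep key (some (pref.getD b "")) h)
            = t'.foldl (pvStep key) (some (pref.getD b "")) by rw [pvStep_some, if_neg hlt]]
      exact this

-- the port's Int-index fold is the cast of the Nat-index fold
theorem pv_int_fold (cs : List Int) :
    ∀ (ns : List Nat) (b : Nat),
      (ns.map (fun k => Int.ofNat k)).foldl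
          (fun b i => if PySem.List.pyGetD cs i 0 > PySem.List.pyGetD cs b 0 then i else b) (b : Int)
        = ((ns.foldl (fun b i => if cs.getD b 0 < cs.getD i 0 then i else b) b : Nat) : Int) := by
  intro ns
  induction ns with
  | nil => intro b; rfl
  | cons i ns' ih =>
    intro b
    rw [List.map_cons, List.foldl_cons, List.foldl_cons]
    have h1 : PySem.List.pyGetD cs (Int.ofNat i) 0 = cs.getD i 0 := PySem.List.pyGetD_natCast cs i 0
    have h2 : PySem.List.pyGetD cs ((b : Nat) : Int) 0 = cs.getD b 0 := PySem.List.pyGetD_natCast cs b 0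
    by_cases hc : cs.getD b 0 < cs.getD i 0
    · rw [if_pos (by rw [gt_iff_lt, h1, h2]; exact hc), if_pos hc]; exact ih i
    · rw [if_neg (by rw [gt_iff_lt, h1, h2]; exact hc), if_neg hc]; exact ih b

-- ===== VERDICT (by name: the statement is the Claim_ definition above) =====
theorem most_frequent_chars_to_string_spec : Claim_equal_most_frequent_chars_to_string := by
  intro mfd wl _hdom hpre
  unfold Spec_most_frequent_chars_to_string
  unfold most_frequent_chars_to_string most_frequent_chars_to_string_alt
  cases wl with
  | nil => exact absurd rfl hpre
  | cons w0 t =>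
    set top5 := PySem.List.slice
      (PySem.List.sorted (PySem.Dict.keys (PySem.Dict.ofList mfd))
        (fun k => PySem.Dict.getD (PySem.Dict.ofList mfd) k 0) true) none (some 5) with htop5
    set g : String → Int := fun w =>
      top5.foldl (fun score c => if PySem.Str.isIn c w then score + 1 else score) (0 : Int) with hg
    dsimp only
    -- A's side
    rw [pv_A_maxD (w0 :: t) g]
    -- B's counts list is the per-word scores, index-aligned
    have hrepl : List.replicate (w0 :: t).length (0 : Int)
        = (w0 :: t).map (fun _ => (0 : Int)) := by simp [List.replicate_succ]
    have hcounts : top5.foldl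
        (fun counts c => (counts.zip (w0 :: t)).map
          (fun p => p.1 + (if PySem.Str.isIn c p.2 then (1 : Int) else 0)))
        (List.replicate (w0 :: t).length (0 : Int)) = (w0 :: t).map g := by
      rw [hrepl, pv_counts_eq (w0 :: t) top5 (fun _ => 0)]
    rw [hcounts]
    -- the Int range is the cast of the Nat range
    have hrange : PySem.List.pyRange 1 ((w0 :: t).length : Int) 1
        = (List.range' 1 t.length).map (fun k => Int.ofNat k) := by
      rw [PySem.List.pyRange_one, List.range'_eq_map_range]
      have : ((((w0 :: t).length : Int)) - 1).toNat = t.length := by simp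
      rw [this, List.map_map]
      apply List.map_congr_left
      intro k _
      show (1 : Int) + (k : Int) = Int.ofNat (1 + k)
      rw [Int.ofNat_eq_natCast]
      push_cast
      ring
    have hfold0 := pv_int_fold ((w0 :: t).map g) (List.range' 1 t.length) 0
    simp only [Nat.cast_zero] at hfold0
    rw [hrange, hfold0]
    -- the Nat-index argmax returns the first-wins maximum
    have hidx := pv_idx_fold g t [w0] 0 (by simp)
    simp only [List.singleton_append, List.length_singleton] at hidx
    obtain ⟨hlt, hval⟩ := hidx
    have hfold : (w0 :: t).foldl (pvStep g) none = t.foldl (pvStep g) (some w0) := rfl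
    have hmaxD : PySem.List.maxD (w0 :: t) g "" = (t.foldl (pvStep g) (some w0)).getD "" := by
      unfold PySem.List.maxD
      rw [pv_max?_eq_foldl, hfold]
    have hx : (List.range' 1 t.length).foldl
      (fun b i => if ((w0 :: t).map g).getD b 0 < ((w0 :: t).map g).getD i 0 then i else b) 0 < (w0 :: t).length := hlt
    have hv : (w0 :: t).getD ((List.range' 1 t.length).foldl
        (fun b i => if ((w0 :: t).map g).getD b 0 < ((w0 :: t).map g).getD i 0 then i else b) 0) ""
        = (t.foldl (pvStep g) (some w0)).getD "" := hval
    have hget : PySem.List.pyGet? (w0 :: t)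
        (((List.range' 1 t.length).foldl
          (fun b i => if ((w0 :: t).map g).getD b 0 < ((w0 :: t).map g).getD i 0 then i else b) 0 : Nat) : Int)
        = some ((w0 :: t).getD ((List.range' 1 t.length).foldl
          (fun b i => if ((w0 :: t).map g).getD b 0 < ((w0 :: t).map g).getD i 0 then i else b) 0) "") := by
      rw [PySem.List.pyGet?_natCast]
      rw [List.getElem?_eq_getElem hx, List.getD_eq_getElem _ _ hx]
    rw [hget]
    simp only [Option.getD_some]
    rw [hv, hmaxD]
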